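-- pv_equiv track=rewrite | github.com/adrianwedd/agentic-research-engine | scripts/dependency_integration_manager.py | _determine_update_type
-- ===== SOURCE A (Python) =====
-- def _determine_update_type(current: str, latest: str) -> str:
--     """Determine if update is major, minor, or patch"""
--     try:
--         # Simple semantic version comparison
--         current_parts = [int(x) for x in current.split('.')]
--         latest_parts = [int(x) for x in latest.split('.')]
--
--         # Pad versions to same length
--         max_len = max(len(current_parts), len(latest_parts))
--         current_parts += [0] * (max_len - len(current_parts))
--         latest_parts += [0] * (max_len - len(latest_parts))
--
--         if latest_parts[0] > current_parts[0]:
--             return "major"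
--         elif len(current_parts) > 1 and latest_parts[1] > current_parts[1]:
--             return "minor"
--         else:
--             return "patch"
--     except (ValueError, IndexError):
--         return "unknown"
-- ===== SOURCE B (Python) =====
-- def _first_bump(i, cur, lat):
--     if not cur and not lat:
--         return "patch"
--     c = cur[0] if cur else 0
--     l = lat[0] if lat else 0
--     if l > c:
--         return ("major", "minor")[i] if i < 2 else "patch"
--     return _first_bump(i + 1, cur[1:], lat[1:])
--
--
-- def _determine_update_type(current: str, latest: str) -> str:
--     """Determine if update is major, minor, or patch"""
--     try:
--         cur = [int(x) for x in current.split('.')]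
--         lat = [int(x) for x in latest.split('.')]
--         return _first_bump(0, cur, lat)
--     except ValueError:
--         return "unknown"
-- ===== Notes on version B (the rewrite author's own statement) =====
-- stated objective: simpler
-- what changed: Replaces padding-to-equal-length plus explicit major/minor branch logic with a single recursive scan over both part lists (missing parts read as 0) that returns the label of the first position where latest exceeds current, 'patch' for positions >= 2 or no such position.
import Mathlib
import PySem

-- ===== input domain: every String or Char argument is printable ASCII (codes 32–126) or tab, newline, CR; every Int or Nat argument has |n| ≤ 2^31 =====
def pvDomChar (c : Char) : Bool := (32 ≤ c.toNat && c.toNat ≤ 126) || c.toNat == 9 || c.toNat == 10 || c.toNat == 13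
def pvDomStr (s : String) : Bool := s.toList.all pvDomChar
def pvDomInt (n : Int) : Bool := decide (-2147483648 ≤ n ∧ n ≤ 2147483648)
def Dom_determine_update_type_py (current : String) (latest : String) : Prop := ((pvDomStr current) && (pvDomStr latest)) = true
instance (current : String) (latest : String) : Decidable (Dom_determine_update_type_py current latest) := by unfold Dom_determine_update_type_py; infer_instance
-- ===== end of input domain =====

-- B replaces A's pad-then-branch comparison by one recursive scan over both part lists
-- (missing parts read as 0) returning the label of the first position where latest > current;
-- same return value, objective: simpler.

-- ===== PORT A =====
-- [int(x) for x in s.split('.')] (ValueError = none), shared by both Pythons verbatim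
def pyParseVersion (s : String) : Option (List Int) :=
  (PySem.Chars.splitOn s.toList ['.']).mapM PySem.Int.ofChars?

-- the body of A's try block after the two parses succeeded (IndexError = "unknown")
def aClassify (cp0 lp0 : List Int) : String :=
  let maxLen := max cp0.length lp0.length
  let cp := cp0 ++ List.replicate (maxLen - cp0.length) 0
  let lp := lp0 ++ List.replicate (maxLen - lp0.length) 0
  match PySem.List.pyGet? lp 0, PySem.List.pyGet? cp 0 with
  | some l0, some c0 =>
    if l0 > c0 then "major"
    else if 1 < cp.length then
      match PySem.List.pyGet? lp 1, PySem.List.pyGet? cp 1 with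
      | some l1, some c1 => if l1 > c1 then "minor" else "patch"
      | _, _ => "unknown"
    else "patch"
  | _, _ => "unknown"

def determine_update_type_py (current : String) (latest : String) : String :=
  match pyParseVersion current, pyParseVersion latest with
  | some cp, some lp => aClassify cp lp
  | _, _ => "unknown"

-- ===== PORT B =====
-- labels[i] if i < 2 else "patch"
def bumpLabel (i : Nat) : String :=
  if i < 2 then (["major", "minor"].getD i "patch") else "patch"

-- _first_bump from Source B: 'cur[0] if cur else 0' / 'lat[0] if lat else 0' become the match
def first_bump : Nat → List Int → List Int → String
  | _, [], [] => "patch"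
  | i, c :: cs, [] => if 0 > c then bumpLabel i else first_bump (i + 1) cs []
  | i, [], l :: ls => if l > 0 then bumpLabel i else first_bump (i + 1) [] ls
  | i, c :: cs, l :: ls => if l > c then bumpLabel i else first_bump (i + 1) cs ls

def determine_update_type_py_alt (current : String) (latest : String) : String :=
  match pyParseVersion current, pyParseVersion latest with
  | some cur, some lat => first_bump 0 cur lat
  | _, _ => "unknown"

-- ===== PRECONDITION & SPEC =====
def Spec_determine_update_type_py (current : String) (latest : String) (out : String) : Prop := out = determine_update_type_py_alt current latest
instance (current : String) (latest : String) (out : String) : Decidable (Spec_determine_update_type_py current latest out) := by unfold Spec_determine_update_type_py; infer_instance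

-- ===== CLAIM (what is proved, stated in full; the proofs are below) =====
def Claim_equal_determine_update_type_py : Prop := ∀ (current : String) (latest : String), Dom_determine_update_type_py current latest → Spec_determine_update_type_py current latest (determine_update_type_py current latest)

-- ===== LEMMAS AND PROOFS =====

lemma pyGet?_one {α : Type} (a b : α) (t : List α) : PySem.List.pyGet? (a :: b :: t) (1 : Int) = some b := by
  rw [show (1 : Int) = ((1 : Nat) : Int) by norm_num, PySem.List.pyGet?_natCast]
  simp

lemma splitOn_go_ne_nil (sep : List Char) :
    ∀ (fuel : Nat) (l cur : List Char) (acc : List (List Char)),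
      PySem.Chars.splitOn.go sep fuel l cur acc ≠ [] := by
  intro fuel
  induction fuel with
  | zero => intro l cur acc; simp [PySem.Chars.splitOn.go]
  | succ n ih =>
    intro l cur acc
    cases l with
    | nil => simp [PySem.Chars.splitOn.go]
    | cons c rest =>
      rw [PySem.Chars.splitOn.go]
      split
      · exact ih _ _ _
      · exact ih _ _ _

lemma parse_ne_nil {s : String} {ps : List Int} (h : pyParseVersion s = some ps) : ps ≠ [] := by
  unfold pyParseVersion at h
  have hne : PySem.Chars.splitOn s.toList ['.'] ≠ [] := by
    unfold PySem.Chars.splitOn; exact splitOn_go_ne_nil _ _ _ _ _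
  cases hsp : PySem.Chars.splitOn s.toList ['.'] with
  | nil => exact absurd hsp hne
  | cons a as =>
    rw [hsp] at h
    simp only [List.mapM_cons, Option.bind_eq_bind, Option.bind_eq_some_iff,
      Option.pure_def, Option.some.injEq] at h
    obtain ⟨b, _, bs, _, hps⟩ := h
    subst hps
    simp

lemma first_bump_ge_two : ∀ (cur lat : List Int) (i : Nat), 2 ≤ i → first_bump i cur lat = "patch" := by
  intro cur
  induction cur with
  | nil =>
    intro lat
    induction lat with
    | nil => intro i _; simp [first_bump]
    | cons l ls ihl =>
      intro i hi
      rw [first_bump]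
      split
      · simp [bumpLabel, Nat.not_lt.mpr hi]
      · exact ihl (i + 1) (by omega)
  | cons c cs ihc =>
    intro lat i hi
    cases lat with
    | nil =>
      rw [first_bump]
      split
      · simp [bumpLabel, Nat.not_lt.mpr hi]
      · exact ihc [] (i + 1) (by omega)
    | cons l ls =>
      rw [first_bump]
      split
      · simp [bumpLabel, Nat.not_lt.mpr hi]
      · exact ihc ls (i + 1) (by omega)

lemma aClassify_eq_first_bump (cp lp : List Int) (hc : cp ≠ []) (hl : lp ≠ []) :
    aClassify cp lp = first_bump 0 cp lp := by
  obtain ⟨c, cs, rfl⟩ := List.exists_cons_of_ne_nil hc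
  obtain ⟨l, ls, rfl⟩ := List.exists_cons_of_ne_nil hl
  unfold aClassify
  simp only [List.cons_append, PySem.List.pyGet?_zero_cons]
  by_cases h0 : l > c
  · simp [h0, first_bump, bumpLabel]
  · simp only [h0, if_false]
    rw [first_bump]
    simp only [h0, if_false]
    cases cs with
    | nil =>
      cases ls with
      | nil => simp [first_bump]
      | cons l1 ls' =>
        rw [show (List.replicate (max ([c] : List Int).length (l :: l1 :: ls').length - ([c] : List Int).length) (0 : Int)) = (0 : Int) :: List.replicate ls'.length 0 by
          rw [show max ([c] : List Int).length (l :: l1 :: ls').length - ([c] : List Int).length = ls'.length + 1 by simp only [List.length_cons, List.length_nil]; omega]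
          simp [List.replicate_succ]]
        rw [show max ([c] : List Int).length (l :: l1 :: ls').length - (l :: l1 :: ls').length = 0 by simp only [List.length_cons, List.length_nil]; omega]
        simp only [List.replicate_zero, List.append_nil, List.nil_append]
        rw [pyGet?_one, pyGet?_one]
        simp only [List.length_cons]
        rw [if_pos (by omega)]
        rw [first_bump]
        by_cases h1 : l1 > 0
        · simp [h1, bumpLabel]
        · simp [h1, first_bump_ge_two _ _ 2 (by omega)]
    | cons c1 cs' =>
      cases ls with
      | nil =>
        rw [show (List.replicate (max (c :: c1 :: cs').length ([l] : List Int).length - ([l] : List Int).length) (0 : Int)) = (0 : Int) :: List.replicate cs'.length 0 by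
          rw [show max (c :: c1 :: cs').length ([l] : List Int).length - ([l] : List Int).length = cs'.length + 1 by simp only [List.length_cons, List.length_nil]; omega]
          simp [List.replicate_succ]]
        rw [show max (c :: c1 :: cs').length ([l] : List Int).length - (c :: c1 :: cs').length = 0 by simp only [List.length_cons, List.length_nil]; omega]
        simp only [List.replicate_zero, List.append_nil, List.nil_append]
        rw [pyGet?_one, pyGet?_one]
        simp only [List.length_cons]
        rw [if_pos (by omega)]
        rw [first_bump]
        by_cases h1 : (0 : Int) > c1
        · simp [h1, bumpLabel]
        · simp [h1, first_bump_ge_two _ _ 2 (by omega)]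
      | cons l1 ls' =>
        simp only [List.cons_append]
        rw [pyGet?_one, pyGet?_one]
        simp only [List.length_cons]
        rw [if_pos (by omega)]
        rw [first_bump]
        by_cases h1 : l1 > c1
        · simp [h1, bumpLabel]
        · simp [h1, first_bump_ge_two _ _ 2 (by omega)]

-- ===== VERDICT (by name: the statement is the Claim_ definition above) =====
theorem determine_update_type_py_spec : Claim_equal_determine_update_type_py := by
  intro current latest _
  unfold Spec_determine_update_type_py determine_update_type_py determine_update_type_py_alt
  cases hc : pyParseVersion current with
  | none => rfl
  | some cp =>
    cases hl : pyParseVersion latest with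
    | none => rfl
    | some lp =>
      exact aClassify_eq_first_bump cp lp (parse_ne_nil hc) (parse_ne_nil hl)
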